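-- pv_equiv track=rewrite | github.com/zakhildev/ok-solvery | src/solvers.py | moore_hodgson
-- ===== SOURCE A (Python) =====
-- import heapq
--
-- def moore_hodgson(p_times, deadlines):
--     """
--     Minimalizacja liczby spóźnionych zadań (1 || U_j).
--     Algorytm zachłanny O(n log n).
--     """
--     tasks = []
--     for i in range(len(p_times)):
--         tasks.append((p_times[i], deadlines[i], i + 1))
--
--     # 1. Sortuj zadania wg terminów (EDD)
--     tasks.sort(key=lambda x: x[1])
--
--     current_time = 0
--     scheduled_tasks = [] # Max-heap (przechowuje (-p, deadline, id))
--
--     late_tasks = []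
--
--     for p, d, task_id in tasks:
--         heapq.heappush(scheduled_tasks, (-p, d, task_id))
--         current_time += p
--
--         if current_time > d:
--             # Jeśli przekroczyliśmy termin, wyrzucamy najdłuższe zadanie z dotychczasowych
--             longest_p, longest_d, longest_id = heapq.heappop(scheduled_tasks)
--             # longest_p jest ujemne, więc odejmując dodajemy
--             current_time += longest_p
--             late_tasks.append(longest_id)
--
--     num_late = len(late_tasks)
--     return num_late, late_tasks
-- ===== SOURCE B (Python) =====
-- def moore_hodgson(p_times, deadlines):
--     # EDD sort, then keep a plain list of accepted tasks; on overflow evict the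
--     # longest accepted task (ties: smallest deadline, then smallest id) by a linear scan.
--     tasks = sorted([(p, d, i) for i, (p, d) in enumerate(zip(p_times, deadlines), 1)],
--                    key=lambda t: t[1])
--     current_time = 0
--     accepted = []
--     late_tasks = []
--     for p, d, i in tasks:
--         accepted.append((p, d, i))
--         current_time += p
--         if current_time > d:
--             worst = accepted[0]
--             for t in accepted[1:]:
--                 if (-t[0], t[1], t[2]) < (-worst[0], worst[1], worst[2]):
--                     worst = t
--             accepted.remove(worst)
--             current_time -= worst[0]
--             late_tasks.append(worst[2])
--     return len(late_tasks), late_tasks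
-- ===== Notes on version B (the rewrite author's own statement) =====
-- stated objective: simpler
-- what changed: Replaces the heapq max-heap of (-p, d, id) tuples by a plain list of accepted (p, d, id) tasks with eviction chosen by a linear min-scan using the same (-p, d, id) tie-breaking key, and builds the task list with enumerate(zip(...)) instead of an index loop.
import Mathlib
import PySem

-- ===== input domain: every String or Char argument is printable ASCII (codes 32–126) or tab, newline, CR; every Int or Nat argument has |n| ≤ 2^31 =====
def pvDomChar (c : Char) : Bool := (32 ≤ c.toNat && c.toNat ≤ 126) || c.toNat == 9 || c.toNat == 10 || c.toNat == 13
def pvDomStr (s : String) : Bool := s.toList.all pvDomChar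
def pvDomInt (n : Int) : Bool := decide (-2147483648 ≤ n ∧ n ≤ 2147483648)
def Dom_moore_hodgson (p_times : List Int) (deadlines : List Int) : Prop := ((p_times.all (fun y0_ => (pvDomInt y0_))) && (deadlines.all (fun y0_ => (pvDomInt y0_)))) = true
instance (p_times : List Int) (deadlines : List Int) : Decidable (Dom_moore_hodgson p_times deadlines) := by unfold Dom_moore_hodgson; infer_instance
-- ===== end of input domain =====

-- B replaces A's heap of (-p, d, id) tuples by a plain list of accepted (p, d, id) tasks,
-- evicting via a linear min-scan with the same tie-breaking key (objective: simpler).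

-- Python's lexicographic `<` on int triples (used by heapq on its (-p, d, id) tuples and by B's scan)
def mhLexLt (a b : Int × Int × Int) : Bool :=
  a.1 < b.1 || (a.1 == b.1 && (a.2.1 < b.2.1 || (a.2.1 == b.2.1 && a.2.2 < b.2.2)))

-- ===== PORT A =====
-- heapq modeled as an ordered list: heappush = ordered insert, heappop = take the head.
-- Exact for the priority-queue behaviour A observes: each heappop returns the least tuple.
def heapPush (x : Int × Int × Int) : List (Int × Int × Int) → List (Int × Int × Int)
  | [] => [x]
  | y :: ys => if mhLexLt x y then x :: y :: ys else y :: heapPush x ys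

def stepA (s : Int × List (Int × Int × Int) × List Int) (t : Int × Int × Int) :
    Int × List (Int × Int × Int) × List Int :=
  let heap := heapPush (-t.1, t.2.1, t.2.2) s.2.1
  let time := s.1 + t.1
  if t.2.1 < time then
    match heap with
    | [] => (time, heap, s.2.2)          -- unreachable: heap just received a push
    | m :: hs => (time + m.1, hs, s.2.2 ++ [m.2.2])
  else (time, heap, s.2.2)

def moore_hodgson (p_times : List Int) (deadlines : List Int) : Int × List Int :=
  let tasks := (PySem.List.pyRange 0 (p_times.length) 1).foldl
      (fun acc i => acc ++ [(PySem.List.pyGetD p_times i 0, PySem.List.pyGetD deadlines i 0, i + 1)]) []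
  let tasks := PySem.List.sorted tasks (fun t => t.2.1) false
  let st := tasks.foldl stepA (0, [], [])
  ((st.2.2.length : Int), st.2.2)

-- ===== PORT B =====
def scanWorst (l : List (Int × Int × Int)) : Int × Int × Int :=
  match l with
  | [] => (0, 0, 0)                      -- unreachable: the list just received an append
  | h :: rest =>
    rest.foldl (fun w u => if mhLexLt (-u.1, u.2.1, u.2.2) (-w.1, w.2.1, w.2.2) then u else w) h

def stepB (s : Int × List (Int × Int × Int) × List Int) (t : Int × Int × Int) :
    Int × List (Int × Int × Int) × List Int :=
  let acc := s.2.1 ++ [t]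
  let time := s.1 + t.1
  if t.2.1 < time then
    let worst := scanWorst acc
    let acc := match PySem.List.remove? acc worst with
      | some l => l
      | none => acc                      -- unreachable: worst is a member
    (time - worst.1, acc, s.2.2 ++ [worst.2.2])
  else (time, acc, s.2.2)

def moore_hodgson_alt (p_times : List Int) (deadlines : List Int) : Int × List Int :=
  let tasks := PySem.List.sorted
      ((PySem.List.enumerate (p_times.zip deadlines) 1).map (fun e => (e.2.1, e.2.2, e.1)))
      (fun t => t.2.1) false
  let st := tasks.foldl stepB (0, [], [])
  ((st.2.2.length : Int), st.2.2)

-- ===== PRECONDITION & SPEC =====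
-- A indexes deadlines[i] for every i < len(p_times) and raises IndexError when deadlines is shorter.
def Pre_moore_hodgson (p_times : List Int) (deadlines : List Int) : Prop :=
  p_times.length ≤ deadlines.length
instance (p_times : List Int) (deadlines : List Int) : Decidable (Pre_moore_hodgson p_times deadlines) := by unfold Pre_moore_hodgson; infer_instance
def pvWitness_moore_hodgson : List Int × List Int := ([2, 1, 3], [1, 2, 4])

def Spec_moore_hodgson (p_times : List Int) (deadlines : List Int) (out : Int × List Int) : Prop := out = moore_hodgson_alt p_times deadlines
instance (p_times : List Int) (deadlines : List Int) (out : Int × List Int) : Decidable (Spec_moore_hodgson p_times deadlines out) := by unfold Spec_moore_hodgson; infer_instance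

-- ===== CLAIM (what is proved, stated in full; the proofs are below) =====
def Claim_equal_moore_hodgson : Prop := ∀ (p_times : List Int) (deadlines : List Int), Dom_moore_hodgson p_times deadlines → Pre_moore_hodgson p_times deadlines → Spec_moore_hodgson p_times deadlines (moore_hodgson p_times deadlines)

-- ===== LEMMAS AND PROOFS =====

-- negation applied to a task triple (p, d, id), as pushed on A's heap
def negt (t : Int × Int × Int) : Int × Int × Int := (-t.1, t.2.1, t.2.2)

-- lexicographic ≤ on int triples (Prop form)
def LexLe (a b : Int × Int × Int) : Prop :=
  a.1 < b.1 ∨ (a.1 = b.1 ∧ (a.2.1 < b.2.1 ∨ (a.2.1 = b.2.1 ∧ a.2.2 ≤ b.2.2)))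

theorem mhLexLt_false_iff (a b : Int × Int × Int) : mhLexLt a b = false ↔ LexLe b a := by
  obtain ⟨a1, a2, a3⟩ := a; obtain ⟨b1, b2, b3⟩ := b
  simp [mhLexLt, LexLe]; omega

theorem mhLexLt_true_le (a b : Int × Int × Int) (h : mhLexLt a b = true) : LexLe a b := by
  obtain ⟨a1, a2, a3⟩ := a; obtain ⟨b1, b2, b3⟩ := b
  simp [mhLexLt] at h; simp [LexLe]; omega

theorem LexLe_refl (a : Int × Int × Int) : LexLe a a := by simp [LexLe]

theorem LexLe_trans {a b c : Int × Int × Int} (h1 : LexLe a b) (h2 : LexLe b c) : LexLe a c := by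
  simp [LexLe] at *; omega

theorem LexLe_antisymm {a b : Int × Int × Int} (h1 : LexLe a b) (h2 : LexLe b a) : a = b := by
  obtain ⟨a1, a2, a3⟩ := a; obtain ⟨b1, b2, b3⟩ := b
  simp [LexLe] at h1 h2 ⊢; omega

theorem negt_inj : Function.Injective negt := by
  intro a b h
  obtain ⟨a1, a2, a3⟩ := a; obtain ⟨b1, b2, b3⟩ := b
  simp only [negt, Prod.mk.injEq] at h
  simp only [Prod.mk.injEq]
  omega

theorem heapPush_perm (x : Int × Int × Int) (l : List (Int × Int × Int)) :
    (heapPush x l).Perm (x :: l) := by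
  induction l with
  | nil => simp [heapPush]
  | cons y ys ih =>
    simp only [heapPush]
    split
    · exact List.Perm.refl _
    · exact (ih.cons y).trans (List.Perm.swap x y ys)

theorem heapPush_ne_nil (x : Int × Int × Int) (l : List (Int × Int × Int)) :
    heapPush x l ≠ [] := by
  cases l with
  | nil => simp [heapPush]
  | cons y ys => simp only [heapPush]; split <;> simp

theorem heapPush_pairwise (x : Int × Int × Int) (l : List (Int × Int × Int))
    (h : l.Pairwise LexLe) : (heapPush x l).Pairwise LexLe := by
  induction l with
  | nil => simp [heapPush]
  | cons y ys ih =>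
    rw [List.pairwise_cons] at h
    obtain ⟨hy, hys⟩ := h
    simp only [heapPush]
    split
    · rename_i hlt
      refine List.Pairwise.cons ?_ (List.Pairwise.cons hy hys)
      intro z hz
      rcases List.mem_cons.mp hz with hz | hz
      · exact hz ▸ mhLexLt_true_le _ _ hlt
      · exact LexLe_trans (mhLexLt_true_le _ _ hlt) (hy z hz)
    · rename_i hnlt
      refine List.Pairwise.cons ?_ (ih hys)
      intro z hz
      rcases List.mem_cons.mp ((heapPush_perm x ys).mem_iff.mp hz) with hz' | hz'
      · subst hz'
        exact (mhLexLt_false_iff _ _).mp (Bool.eq_false_iff.mpr hnlt)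
      · exact hy z hz'

theorem scanFold_spec (l : List (Int × Int × Int)) (w : Int × Int × Int) :
    (l.foldl (fun w u => if mhLexLt (-u.1, u.2.1, u.2.2) (-w.1, w.2.1, w.2.2) then u else w) w = w ∨
      l.foldl (fun w u => if mhLexLt (-u.1, u.2.1, u.2.2) (-w.1, w.2.1, w.2.2) then u else w) w ∈ l) ∧
    LexLe (negt (l.foldl (fun w u => if mhLexLt (-u.1, u.2.1, u.2.2) (-w.1, w.2.1, w.2.2) then u else w) w)) (negt w) ∧
    ∀ u ∈ l, LexLe (negt (l.foldl (fun w u => if mhLexLt (-u.1, u.2.1, u.2.2) (-w.1, w.2.1, w.2.2) then u else w) w)) (negt u) := by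
  induction l generalizing w with
  | nil => simp [LexLe_refl]
  | cons h t ih =>
    simp only [List.foldl_cons]
    by_cases hc : mhLexLt (-h.1, h.2.1, h.2.2) (-w.1, w.2.1, w.2.2) = true
    · rw [if_pos hc]
      obtain ⟨hmem, hle, hall⟩ := ih h
      have hhw : LexLe (negt h) (negt w) := mhLexLt_true_le _ _ hc
      refine ⟨?_, LexLe_trans hle hhw, ?_⟩
      · rcases hmem with hm | hm
        · exact Or.inr (List.mem_cons.mpr (Or.inl hm))
        · exact Or.inr (List.mem_cons.mpr (Or.inr hm))
      · intro u hu
        rcases List.mem_cons.mp hu with hu | hu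
        · exact hu ▸ hle
        · exact hall u hu
    · rw [if_neg hc]
      obtain ⟨hmem, hle, hall⟩ := ih w
      have hwh : LexLe (negt w) (negt h) :=
        (mhLexLt_false_iff _ _).mp (Bool.eq_false_iff.mpr hc)
      refine ⟨?_, hle, ?_⟩
      · rcases hmem with hm | hm
        · exact Or.inl hm
        · exact Or.inr (List.mem_cons.mpr (Or.inr hm))
      · intro u hu
        rcases List.mem_cons.mp hu with hu | hu
        · exact hu ▸ LexLe_trans hle hwh
        · exact hall u hu

theorem scanWorst_spec (l : List (Int × Int × Int)) (hl : l ≠ []) :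
    scanWorst l ∈ l ∧ ∀ u ∈ l, LexLe (negt (scanWorst l)) (negt u) := by
  cases l with
  | nil => exact absurd rfl hl
  | cons h t =>
    obtain ⟨hmem, hle, hall⟩ := scanFold_spec t h
    simp only [scanWorst]
    constructor
    · rcases hmem with hm | hm
      · rw [hm]; exact List.mem_cons_self
      · exact List.mem_cons_of_mem h hm
    · intro u hu
      rcases List.mem_cons.mp hu with hu | hu
      · exact hu ▸ hle
      · exact hall u hu

-- main loop correspondence
theorem loop_eq (rs : List (Int × Int × Int)) :
    ∀ (time : Int) (heap acc : List (Int × Int × Int)) (late : List Int),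
    heap.Pairwise LexLe → heap.Perm (acc.map negt) →
    (rs.foldl stepA (time, heap, late)).1 = (rs.foldl stepB (time, acc, late)).1 ∧
    (rs.foldl stepA (time, heap, late)).2.2 = (rs.foldl stepB (time, acc, late)).2.2 := by
  induction rs with
  | nil => intro _ _ _ _ _ _; exact ⟨rfl, rfl⟩
  | cons t rs ih =>
    intro time heap acc late hpw hperm
    simp only [List.foldl_cons]
    have hpush_perm : (heapPush (negt t) heap).Perm ((acc ++ [t]).map negt) := by
      refine (heapPush_perm _ _).trans ?_
      rw [List.map_append]
      exact (hperm.cons _).trans (List.perm_append_singleton (negt t) (acc.map negt)).symm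
    have hpush_pw : (heapPush (negt t) heap).Pairwise LexLe := heapPush_pairwise _ _ hpw
    by_cases hcond : t.2.1 < time + t.1
    · -- eviction branch
      have hne : acc ++ [t] ≠ [] := by simp
      obtain ⟨hwmem, hwmin⟩ := scanWorst_spec (acc ++ [t]) hne
      -- the heap after the push is nonempty
      obtain ⟨m, hs, hcons⟩ := List.exists_cons_of_ne_nil (heapPush_ne_nil (negt t) heap)
      have hmmin : ∀ y ∈ heapPush (negt t) heap, LexLe m y := by
        intro y hy
        rw [hcons] at hy
        rcases List.mem_cons.mp hy with hy | hy
        · exact hy ▸ LexLe_refl m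
        · rw [hcons] at hpush_pw
          exact (List.pairwise_cons.mp hpush_pw).1 y hy
      -- negt (scanWorst (acc ++ [t])) = m
      have hwm : negt (scanWorst (acc ++ [t])) = m := by
        have h1 : negt (scanWorst (acc ++ [t])) ∈ heapPush (negt t) heap :=
          hpush_perm.mem_iff.mpr (List.mem_map_of_mem hwmem)
        have h2 : m ∈ (acc ++ [t]).map negt := by
          rw [hcons] at hpush_perm
          exact hpush_perm.mem_iff.mp List.mem_cons_self
        obtain ⟨x, hx, hxm⟩ := List.mem_map.mp h2
        exact LexLe_antisymm (hxm ▸ hwmin x hx) (hmmin _ h1)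
      have hworst_mem := hwmem
      have hremove := PySem.List.remove?_eq_some_erase (acc ++ [t]) _ hworst_mem
      -- unfold both steps
      have hA : stepA (time, heap, late) t =
          (time + t.1 + m.1, hs, late ++ [m.2.2]) := by
        have hcons' : heapPush (-t.1, t.2.1, t.2.2) heap = m :: hs := hcons
        simp only [stepA]
        rw [if_pos hcond, hcons']
      have hB : stepB (time, acc, late) t =
          (time + t.1 - (scanWorst (acc ++ [t])).1, (acc ++ [t]).erase (scanWorst (acc ++ [t])),
            late ++ [(scanWorst (acc ++ [t])).2.2]) := by
        simp only [stepB]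
        rw [if_pos hcond, hremove]
      rw [hA, hB]
      have hm1 : m.1 = -(scanWorst (acc ++ [t])).1 := by rw [← hwm]; rfl
      have hm2 : m.2.2 = (scanWorst (acc ++ [t])).2.2 := by rw [← hwm]; rfl
      have htime : time + t.1 + m.1 = time + t.1 - (scanWorst (acc ++ [t])).1 := by
        rw [hm1]; ring
      rw [htime, hm2]
      apply ih
      · rw [hcons] at hpush_pw
        exact (List.pairwise_cons.mp hpush_pw).2
      · -- hs ~ erased accepted list
        have : ((acc ++ [t]).erase (scanWorst (acc ++ [t]))).map negt =
            ((acc ++ [t]).map negt).erase m := by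
          rw [List.map_erase negt_inj, hwm]
        rw [this]
        have hperm' := hpush_perm.erase m
        rw [hcons, List.erase_cons_head] at hperm'
        exact hperm'
    · -- no eviction
      have hA : stepA (time, heap, late) t = (time + t.1, heapPush (negt t) heap, late) := by
        simp only [stepA]; rw [if_neg hcond]; rfl
      have hB : stepB (time, acc, late) t = (time + t.1, acc ++ [t], late) := by
        simp only [stepB]; rw [if_neg hcond]
      rw [hA, hB]
      exact ih _ _ _ _ hpush_pw hpush_perm

-- the two task lists coincide under the precondition
theorem tasks_eq (p_times deadlines : List Int) (hle : p_times.length ≤ deadlines.length) :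
    (PySem.List.pyRange 0 (p_times.length) 1).foldl
      (fun acc i => acc ++ [(PySem.List.pyGetD p_times i 0, PySem.List.pyGetD deadlines i 0, i + 1)]) [] =
    (PySem.List.enumerate (p_times.zip deadlines) 1).map (fun e => (e.2.1, e.2.2, e.1)) := by
  rw [PySem.List.foldl_append_singleton_eq_map, PySem.List.pyRange_zero_natCast, List.nil_append,
    List.map_map]
  apply List.ext_getElem
  · simp [PySem.List.length_enumerate]; omega
  · intro k h1 h2
    have hk : k < p_times.length := by simpa using h1
    have hkd : k < deadlines.length := lt_of_lt_of_le hk hle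
    have hkz : k < (p_times.zip deadlines).length := by simp; omega
    simp only [List.getElem_map, Function.comp, List.getElem_range,
      PySem.List.getElem_enumerate, PySem.List.pyGetD_natCast, List.getElem_zip]
    simp only [Prod.mk.injEq, List.getD_eq_getElem?_getD, List.getElem?_eq_getElem hk,
      List.getElem?_eq_getElem hkd, Option.getD_some]
    exact ⟨trivial, trivial, by omega⟩

-- ===== VERDICT (by name: the statement is the Claim_ definition above) =====
theorem moore_hodgson_spec : Claim_equal_moore_hodgson := by
  intro p_times deadlines _ hpre
  unfold Spec_moore_hodgson moore_hodgson moore_hodgson_alt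
  rw [tasks_eq p_times deadlines hpre]
  obtain ⟨h1, h2⟩ := loop_eq
    (PySem.List.sorted ((PySem.List.enumerate (p_times.zip deadlines) 1).map
      (fun e => (e.2.1, e.2.2, e.1))) (fun t => t.2.1) false)
    0 [] [] [] (List.Pairwise.nil) (by simp)
  simp only [h2]
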